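-- pv_equiv track=rewrite | github.com/KristjanESPERANTO/veggiekarte | refresh.py | determine_icon
-- ===== SOURCE A (Python) =====
-- ICON_MAPPING = {
--     # Intentionally not alphabetical order
--     "cuisine:pizza": ["maki_restaurant-pizza", "🍕"],
--     # Alphabetical order
--     "amenity:bar": ["bar", "🍸"],
--     "amenity:bbq": ["bbq", "🍴"],
--     "amenity:cafe": ["cafe", "☕"],
--     "amenity:cinema": ["cinema", "🎦"],
--     "amenity:college": ["maki_college", "🎓"],
--     "amenity:fast_food": ["fast_food", "🍔"],
--     "amenity:food_court": ["restaurant", "🍽️"],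
--     "amenity:fuel": ["fuel", "⛽"],
--     "amenity:hospital": ["hospital", "🏥"],
--     "amenity:ice_cream": ["ice_cream", "🍨"],
--     "amenity:kindergarten": ["playground", "🧒"],
--     "amenity:pharmacy": ["pharmacy", "💊"],
--     "amenity:place_of_worship": ["place_of_worship", "🛐"],
--     "amenity:pub": ["pub", "🍻"],
--     "amenity:restaurant": ["restaurant", "🍽️"],
--     "amenity:school": ["maki_school", "🏫"],
--     "amenity:shelter": ["shelter", "☂️"],
--     "amenity:swimming_pool": ["maki_swimming", "🏊‍♀️"],
--     "amenity:theatre": ["theatre", "🎭"],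
--     "amenity:university": ["maki_college", "🎓"],
--     "amenity:vending_machine": ["maki_shop", "🛒"],
--     "historic:memorial": ["monument", "🗿"],
--     "leisure:golf_course": ["golf", "🏌️"],
--     "leisure:pitch": ["maki_pitch", "🏃"],
--     "leisure:sports_centre": ["sports", "🤼"],
--     "leisure:stadium": ["maki_stadium", "🏟️"],
--     "shop:alcohol": ["alcohol", "🍷"],
--     "shop:bakery": ["bakery", "🥯"],
--     "shop:beauty": ["beauty", "💇"],
--     "shop:bicycle": ["bicycle", "🚲"],
--     "shop:books": ["library", "📚"],
--     "shop:butcher": ["butcher", "🔪"],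
--     "shop:clothes": ["clothes", "👚"],
--     "shop:confectionery": ["confectionery", "🍬"],
--     "shop:convenience": ["convenience", "🏪"],
--     "shop:department_store": ["department_store", "🏬"],
--     "shop:doityourself": ["diy", "🛠️"],
--     "shop:fishmonger": ["maki_shop", "🐟"],
--     "shop:garden_centre": ["garden-centre", "🏡"],
--     "shop:general": ["maki_shop", "🛒"],
--     "shop:gift": ["gift", "🎁"],
--     "shop:greengrocer": ["greengrocer", "🍏"],
--     "shop:hairdresser": ["hairdresser", "💇"],
--     "shop:kiosk": ["maki_shop", "🛒"],
--     "shop:music": ["music", "🎶"],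
--     "shop:supermarket": ["supermarket", "🏪"],
--     "shop:wine": ["alcohol", "🍷"],
--     "tourism:guest_house": ["guest_house", "🏠"],
--     "tourism:museum": ["museum", "🖼️"],
-- }
--
-- def determine_icon(tags):
--     """Determine an icon for the marker."""
--     icon = ["maki_star-stroked", ""]   # Use this icon if there is no matching per ICON_MAPPING.
--     for kv in ICON_MAPPING:
--         k, v = kv.split(":")
--         t = tags.get(k)
--
--         if not t:
--             continue
--
--         t = t.split(";")[0]
--
--         if t == v:
--             icon = ICON_MAPPING[kv]
--             break
--     return icon
-- ===== SOURCE B (Python) =====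
-- # Priority table: one "key:value icon_name emoji" string per entry, in priority
-- # order (earlier entry wins on ties).
-- _TABLE = [
--     "cuisine:pizza maki_restaurant-pizza 🍕",
--     "amenity:bar bar 🍸",
--     "amenity:bbq bbq 🍴",
--     "amenity:cafe cafe ☕",
--     "amenity:cinema cinema 🎦",
--     "amenity:college maki_college 🎓",
--     "amenity:fast_food fast_food 🍔",
--     "amenity:food_court restaurant 🍽️",
--     "amenity:fuel fuel ⛽",
--     "amenity:hospital hospital 🏥",
--     "amenity:ice_cream ice_cream 🍨",
--     "amenity:kindergarten playground 🧒",
--     "amenity:pharmacy pharmacy 💊",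
--     "amenity:place_of_worship place_of_worship 🛐",
--     "amenity:pub pub 🍻",
--     "amenity:restaurant restaurant 🍽️",
--     "amenity:school maki_school 🏫",
--     "amenity:shelter shelter ☂️",
--     "amenity:swimming_pool maki_swimming 🏊‍♀️",
--     "amenity:theatre theatre 🎭",
--     "amenity:university maki_college 🎓",
--     "amenity:vending_machine maki_shop 🛒",
--     "historic:memorial monument 🗿",
--     "leisure:golf_course golf 🏌️",
--     "leisure:pitch maki_pitch 🏃",
--     "leisure:sports_centre sports 🤼",
--     "leisure:stadium maki_stadium 🏟️",
--     "shop:alcohol alcohol 🍷",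
--     "shop:bakery bakery 🥯",
--     "shop:beauty beauty 💇",
--     "shop:bicycle bicycle 🚲",
--     "shop:books library 📚",
--     "shop:butcher butcher 🔪",
--     "shop:clothes clothes 👚",
--     "shop:confectionery confectionery 🍬",
--     "shop:convenience convenience 🏪",
--     "shop:department_store department_store 🏬",
--     "shop:doityourself diy 🛠️",
--     "shop:fishmonger maki_shop 🐟",
--     "shop:garden_centre garden-centre 🏡",
--     "shop:general maki_shop 🛒",
--     "shop:gift gift 🎁",
--     "shop:greengrocer greengrocer 🍏",
--     "shop:hairdresser hairdresser 💇",
--     "shop:kiosk maki_shop 🛒",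
--     "shop:music music 🎶",
--     "shop:supermarket supermarket 🏪",
--     "shop:wine alcohol 🍷",
--     "tourism:guest_house guest_house 🏠",
--     "tourism:museum museum 🖼️",
-- ]
--
-- # Reverse index built once: full "k:v" string -> (priority, icon)
-- _INDEX = {}
-- for _i, _line in enumerate(_TABLE):
--     _kv, _name, _emoji = _line.split(" ")
--     _INDEX[_kv] = (_i, [_name, _emoji])
--
--
-- def determine_icon(tags):
--     """Determine an icon for the marker."""
--     best = None
--     for k, val in tags.items():
--         if not val:
--             continue
--         hit = _INDEX.get(k + ":" + val.split(";")[0])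
--         if hit is not None and (best is None or hit[0] < best[0]):
--             best = hit
--     return best[1] if best is not None else ["maki_star-stroked", ""]
-- ===== Notes on version B (the rewrite author's own statement) =====
-- stated objective: alternative
-- what changed: Instead of scanning the 50-entry priority table and doing a dict lookup plus split per entry, B stores the table as plain text lines, builds a reverse index {'k:v': (priority, icon)} from it once at module load, and makes a single pass over the input tags keeping the hit with the smallest stored priority.
import Mathlib
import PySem

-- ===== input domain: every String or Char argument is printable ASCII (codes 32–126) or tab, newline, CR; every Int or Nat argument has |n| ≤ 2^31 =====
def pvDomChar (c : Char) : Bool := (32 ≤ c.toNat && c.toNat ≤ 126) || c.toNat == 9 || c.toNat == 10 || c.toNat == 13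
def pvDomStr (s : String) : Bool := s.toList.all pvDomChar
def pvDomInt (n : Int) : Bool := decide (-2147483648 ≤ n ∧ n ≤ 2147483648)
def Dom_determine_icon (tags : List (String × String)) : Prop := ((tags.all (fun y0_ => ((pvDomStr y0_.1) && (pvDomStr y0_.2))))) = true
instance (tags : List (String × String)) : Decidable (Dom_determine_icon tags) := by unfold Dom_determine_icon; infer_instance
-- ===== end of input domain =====

-- B replaces A's per-call scan of the priority table by a reverse index ("k:v" -> (priority, icon)),
-- built once from a text-block table, and a single pass over the input tags keeping the hit with the
-- smallest priority (objective: alternative algorithm and data representation).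

-- ===== PORT A =====
-- ICON_MAPPING as an insertion-ordered association list (keys are unique).
def pvTbl : List (String × List String) := [
  ("cuisine:pizza", ["maki_restaurant-pizza", "🍕"]),
  ("amenity:bar", ["bar", "🍸"]),
  ("amenity:bbq", ["bbq", "🍴"]),
  ("amenity:cafe", ["cafe", "☕"]),
  ("amenity:cinema", ["cinema", "🎦"]),
  ("amenity:college", ["maki_college", "🎓"]),
  ("amenity:fast_food", ["fast_food", "🍔"]),
  ("amenity:food_court", ["restaurant", "🍽️"]),
  ("amenity:fuel", ["fuel", "⛽"]),
  ("amenity:hospital", ["hospital", "🏥"]),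
  ("amenity:ice_cream", ["ice_cream", "🍨"]),
  ("amenity:kindergarten", ["playground", "🧒"]),
  ("amenity:pharmacy", ["pharmacy", "💊"]),
  ("amenity:place_of_worship", ["place_of_worship", "🛐"]),
  ("amenity:pub", ["pub", "🍻"]),
  ("amenity:restaurant", ["restaurant", "🍽️"]),
  ("amenity:school", ["maki_school", "🏫"]),
  ("amenity:shelter", ["shelter", "☂️"]),
  ("amenity:swimming_pool", ["maki_swimming", "🏊‍♀️"]),
  ("amenity:theatre", ["theatre", "🎭"]),
  ("amenity:university", ["maki_college", "🎓"]),
  ("amenity:vending_machine", ["maki_shop", "🛒"]),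
  ("historic:memorial", ["monument", "🗿"]),
  ("leisure:golf_course", ["golf", "🏌️"]),
  ("leisure:pitch", ["maki_pitch", "🏃"]),
  ("leisure:sports_centre", ["sports", "🤼"]),
  ("leisure:stadium", ["maki_stadium", "🏟️"]),
  ("shop:alcohol", ["alcohol", "🍷"]),
  ("shop:bakery", ["bakery", "🥯"]),
  ("shop:beauty", ["beauty", "💇"]),
  ("shop:bicycle", ["bicycle", "🚲"]),
  ("shop:books", ["library", "📚"]),
  ("shop:butcher", ["butcher", "🔪"]),
  ("shop:clothes", ["clothes", "👚"]),
  ("shop:confectionery", ["confectionery", "🍬"]),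
  ("shop:convenience", ["convenience", "🏪"]),
  ("shop:department_store", ["department_store", "🏬"]),
  ("shop:doityourself", ["diy", "🛠️"]),
  ("shop:fishmonger", ["maki_shop", "🐟"]),
  ("shop:garden_centre", ["garden-centre", "🏡"]),
  ("shop:general", ["maki_shop", "🛒"]),
  ("shop:gift", ["gift", "🎁"]),
  ("shop:greengrocer", ["greengrocer", "🍏"]),
  ("shop:hairdresser", ["hairdresser", "💇"]),
  ("shop:kiosk", ["maki_shop", "🛒"]),
  ("shop:music", ["music", "🎶"]),
  ("shop:supermarket", ["supermarket", "🏪"]),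
  ("shop:wine", ["alcohol", "🍷"]),
  ("tourism:guest_house", ["guest_house", "🏠"]),
  ("tourism:museum", ["museum", "🖼️"])
]

-- the 'for kv in ICON_MAPPING' loop; break = returning early with ICON_MAPPING[kv]
def pvALoop (tags : PySem.Dict String String) : List (String × List String) → List String
  | [] => ["maki_star-stroked", ""]
  | (kv, ic) :: rest =>
    match PySem.Str.split? kv ":" with
    | some [k, v] =>
      (match tags.get? k with
       | none => pvALoop tags rest
       | some t =>
         if t = "" then pvALoop tags rest
         else if PySem.List.pyGetD ((PySem.Str.split? t ";").getD []) 0 "" = v then ic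
         else pvALoop tags rest)
    | _ => pvALoop tags rest  -- unreachable: every key of pvTbl contains exactly one ':'

def determine_icon (tags : List (String × String)) : List String :=
  pvALoop (PySem.Dict.mk tags) pvTbl

-- ===== PORT B =====
-- _TABLE: one "key:value icon_name emoji" string per entry, in priority order.
def pvTable : List String := [
  "cuisine:pizza maki_restaurant-pizza 🍕",
  "amenity:bar bar 🍸",
  "amenity:bbq bbq 🍴",
  "amenity:cafe cafe ☕",
  "amenity:cinema cinema 🎦",
  "amenity:college maki_college 🎓",
  "amenity:fast_food fast_food 🍔",
  "amenity:food_court restaurant 🍽️",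
  "amenity:fuel fuel ⛽",
  "amenity:hospital hospital 🏥",
  "amenity:ice_cream ice_cream 🍨",
  "amenity:kindergarten playground 🧒",
  "amenity:pharmacy pharmacy 💊",
  "amenity:place_of_worship place_of_worship 🛐",
  "amenity:pub pub 🍻",
  "amenity:restaurant restaurant 🍽️",
  "amenity:school maki_school 🏫",
  "amenity:shelter shelter ☂️",
  "amenity:swimming_pool maki_swimming 🏊‍♀️",
  "amenity:theatre theatre 🎭",
  "amenity:university maki_college 🎓",
  "amenity:vending_machine maki_shop 🛒",
  "historic:memorial monument 🗿",
  "leisure:golf_course golf 🏌️",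
  "leisure:pitch maki_pitch 🏃",
  "leisure:sports_centre sports 🤼",
  "leisure:stadium maki_stadium 🏟️",
  "shop:alcohol alcohol 🍷",
  "shop:bakery bakery 🥯",
  "shop:beauty beauty 💇",
  "shop:bicycle bicycle 🚲",
  "shop:books library 📚",
  "shop:butcher butcher 🔪",
  "shop:clothes clothes 👚",
  "shop:confectionery confectionery 🍬",
  "shop:convenience convenience 🏪",
  "shop:department_store department_store 🏬",
  "shop:doityourself diy 🛠️",
  "shop:fishmonger maki_shop 🐟",
  "shop:garden_centre garden-centre 🏡",
  "shop:general maki_shop 🛒",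
  "shop:gift gift 🎁",
  "shop:greengrocer greengrocer 🍏",
  "shop:hairdresser hairdresser 💇",
  "shop:kiosk maki_shop 🛒",
  "shop:music music 🎶",
  "shop:supermarket supermarket 🏪",
  "shop:wine alcohol 🍷",
  "tourism:guest_house guest_house 🏠",
  "tourism:museum museum 🖼️"
]

-- the module-level loop building _INDEX: for _i, _line in enumerate(_TABLE): ...
def pvIndex : PySem.Dict String (Int × List String) :=
  (PySem.List.enumerate pvTable).foldl
    (fun d p =>
      match PySem.Str.split? p.2 " " with
      | some [kv, nm, em] => d.insert kv (p.1, [nm, em])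
      | _ => d)  -- unreachable: every entry of pvTable has exactly two spaces
    PySem.Dict.empty

-- cand = k + ":" + val.split(";")[0]
def pvCand (k val : String) : String :=
  k ++ ":" ++ PySem.List.pyGetD ((PySem.Str.split? val ";").getD []) 0 ""

-- the 'for k, val in tags.items()' loop accumulating best (idx is the module-level _INDEX)
def pvBLoop (idx : PySem.Dict String (Int × List String)) :
    Option (Int × List String) → List (String × String) → Option (Int × List String)
  | best, [] => best
  | best, (k, val) :: rest =>
    if val = "" then pvBLoop idx best rest
    else
      match PySem.Dict.get? idx (pvCand k val) with
      | none => pvBLoop idx best rest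
      | some hit =>
        match best with
        | none => pvBLoop idx (some hit) rest
        | some b => if hit.1 < b.1 then pvBLoop idx (some hit) rest else pvBLoop idx best rest

def determine_icon_alt (tags : List (String × String)) : List String :=
  match pvBLoop pvIndex none tags with
  | some b => b.2
  | none => ["maki_star-stroked", ""]

-- ===== PRECONDITION & SPEC =====
-- Pre_ excludes association lists with duplicate keys: a Python dict argument cannot represent them,
-- so any behaviour on them is an artefact of the list encoding.
def Pre_determine_icon (tags : List (String × String)) : Prop := (tags.map Prod.fst).Nodup
instance (tags : List (String × String)) : Decidable (Pre_determine_icon tags) := by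
  unfold Pre_determine_icon; infer_instance

def pvWitness_determine_icon : (List (String × String)) := [("amenity", "bar"), ("shop", "wine")]

def Spec_determine_icon (tags : List (String × String)) (out : List String) : Prop := out = determine_icon_alt tags
instance (tags : List (String × String)) (out : List String) : Decidable (Spec_determine_icon tags out) := by unfold Spec_determine_icon; infer_instance

-- ===== CLAIM (what is proved, stated in full; the proofs are below) =====
def Claim_equal_determine_icon : Prop := ∀ (tags : List (String × String)), Dom_determine_icon tags → Pre_determine_icon tags → Spec_determine_icon tags (determine_icon tags)

-- ===== LEMMAS AND PROOFS =====

-- the parsed index, in the closed form the equivalence proof works with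
def pvIndex' : PySem.Dict String (Int × List String) :=
  PySem.Dict.mk ((PySem.List.enumerate pvTbl).map (fun p => (p.2.1, (p.1, p.2.2))))

set_option maxRecDepth 100000 in
set_option maxHeartbeats 4000000 in
theorem pvIndex_eq : pvIndex = pvIndex' := by decide

-- Does the table entry with full key kv match the tag dict?  (mirrors one iteration of A's loop)
def pvMatch (d : PySem.Dict String String) (kv : String) : Bool :=
  match PySem.Str.split? kv ":" with
  | some [k, v] =>
    (match d.get? k with
     | none => false
     | some t =>
       if t = "" then false
       else decide (PySem.List.pyGetD ((PySem.Str.split? t ";").getD []) 0 "" = v))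
  | _ => false

theorem pvALoop_cons (d : PySem.Dict String String) (kv : String) (ic : List String)
    (rest : List (String × List String)) :
    pvALoop d ((kv, ic) :: rest) = if pvMatch d kv then ic else pvALoop d rest := by
  conv_lhs => rw [pvALoop]
  unfold pvMatch
  cases hs : PySem.Str.split? kv ":" with
  | none => simp
  | some l =>
    match l with
    | [] => simp
    | [k] => simp
    | k :: v :: w :: ws => simp
    | [k, v] =>
      cases hg : PySem.Dict.get? d k with
      | none => simp [hg]
      | some t =>
        by_cases ht : t = ""
        · simp [hg, ht]
        · by_cases hv : PySem.List.pyGetD ((PySem.Str.split? t ";").getD []) 0 "" = v <;>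
            simp [hg, ht, hv]

theorem pvALoop_eq_filter (d : PySem.Dict String String) (l : List (String × List String)) :
    pvALoop d l = match l.filter (fun e => pvMatch d e.1) with
      | [] => ["maki_star-stroked", ""]
      | e :: _ => e.2 := by
  induction l with
  | nil => rfl
  | cons e rest ih =>
    obtain ⟨kv, ic⟩ := e
    rw [pvALoop_cons, List.filter_cons]
    by_cases hm : pvMatch d kv = true
    · simp [hm]
    · simp only [Bool.not_eq_true] at hm
      simp [hm, ih]

-- B's accumulator step
def pvStep (best : Option (Int × List String)) (hit : Int × List String) : Option (Int × List String) :=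
  match best with
  | none => some hit
  | some b => if hit.1 < b.1 then some hit else some b

-- the list of index hits B's loop sees, in tag order
def pvHitsI (idx : PySem.Dict String (Int × List String)) (tags : List (String × String)) :
    List (Int × List String) :=
  tags.filterMap (fun p => if p.2 = "" then none else PySem.Dict.get? idx (pvCand p.1 p.2))

theorem pvBLoop_eq_foldl (idx : PySem.Dict String (Int × List String))
    (tags : List (String × String)) :
    ∀ best, pvBLoop idx best tags = List.foldl pvStep best (pvHitsI idx tags) := by
  induction tags with
  | nil => intro best; rfl
  | cons p rest ih =>
    intro best
    obtain ⟨k, val⟩ := p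
    by_cases hv : val = ""
    · simp [pvBLoop, pvHitsI, hv, ih]
    · rcases hg : PySem.Dict.get? idx (pvCand k val) with _ | hit
      · simp [pvBLoop, pvHitsI, hv, hg, ih]
      · rcases best with _ | b
        · simp [pvBLoop, pvHitsI, hv, hg, ih, pvStep]
        · by_cases hlt : hit.1 < b.1 <;>
            simp [pvBLoop, pvHitsI, hv, hg, ih, pvStep, hlt]

theorem pvFoldl_min (hs : List (Int × List String)) :
    ∀ b, ∃ m, List.foldl pvStep (some b) hs = some m ∧ (m = b ∨ m ∈ hs) ∧ m.1 ≤ b.1 ∧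
      ∀ h ∈ hs, m.1 ≤ h.1 := by
  induction hs with
  | nil => intro b; exact ⟨b, rfl, Or.inl rfl, le_refl _, by simp⟩
  | cons h t ih =>
    intro b
    by_cases hlt : h.1 < b.1
    · obtain ⟨m, hm, hmem, hle, hmin⟩ := ih h
      refine ⟨m, ?_, ?_, ?_, ?_⟩
      · simpa [List.foldl_cons, pvStep, hlt] using hm
      · rcases hmem with rfl | hmem
        · exact Or.inr (List.mem_cons_self ..)
        · exact Or.inr (List.mem_cons_of_mem _ hmem)
      · omega
      · intro x hx
        rcases List.mem_cons.mp hx with rfl | hx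
        · exact hle
        · exact hmin x hx
    · obtain ⟨m, hm, hmem, hle, hmin⟩ := ih b
      refine ⟨m, ?_, ?_, hle, ?_⟩
      · simpa [List.foldl_cons, pvStep, hlt] using hm
      · rcases hmem with rfl | hmem
        · exact Or.inl rfl
        · exact Or.inr (List.mem_cons_of_mem _ hmem)
      · intro x hx
        rcases List.mem_cons.mp hx with rfl | hx
        · omega
        · exact hmin x hx

-- table-key shape: every key of pvTbl splits as [k, v] with colon-free halves
def pvK (kv : String) : String := ((PySem.Str.split? kv ":").getD []).getD 0 ""
def pvV (kv : String) : String := ((PySem.Str.split? kv ":").getD []).getD 1 ""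

theorem pvTbl_key_fact : ∀ p ∈ pvTbl,
    PySem.Str.split? p.1 ":" = some [pvK p.1, pvV p.1] ∧
    p.1.toList = (pvK p.1).toList ++ ':' :: (pvV p.1).toList ∧
    ((pvK p.1).toList.contains ':') = false ∧ ((pvV p.1).toList.contains ':') = false := by decide

theorem pvIndex'_keys_nodup : pvIndex'.keys.Nodup := by decide

-- first colon splits uniquely
theorem pvColonSplit : ∀ (c : List Char) (a b d : List Char), (':' ∉ c) → (':' ∉ d) →
    a ++ ':' :: b = c ++ ':' :: d → a = c ∧ b = d := by
  intro c
  induction c with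
  | nil =>
    intro a b d _ hd h
    cases a with
    | nil => simpa using h
    | cons x a' =>
      rw [List.cons_append, List.nil_append] at h
      injection h with h1 h2
      have : (':' : Char) ∈ d := h2 ▸ (by simp : (':' : Char) ∈ a' ++ ':' :: b)
      exact absurd this hd
  | cons y c' ih =>
    intro a b d hc hd h
    cases a with
    | nil =>
      rw [List.nil_append, List.cons_append] at h
      injection h with h1 h2
      exact absurd (h1 ▸ List.mem_cons_self ..) hc
    | cons x a' =>
      rw [List.cons_append, List.cons_append] at h
      injection h with h1 h2
      obtain ⟨ha, hb⟩ := ih a' b d (fun hm => hc (List.mem_cons_of_mem _ hm)) hd h2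
      exact ⟨by rw [h1, ha], hb⟩

theorem pvCand_eq_iff (k h kv k0 v0 : String)
    (hsplit : kv.toList = k0.toList ++ ':' :: v0.toList)
    (hk0 : ':' ∉ k0.toList) (hv0 : ':' ∉ v0.toList) :
    k ++ ":" ++ h = kv ↔ (k = k0 ∧ h = v0) := by
  constructor
  · intro he
    have : (k ++ ":" ++ h).toList = kv.toList := by rw [he]
    rw [String.toList_append, String.toList_append, hsplit] at this
    have hcol : (":" : String).toList = [':'] := rfl
    rw [hcol] at this
    have := pvColonSplit k0.toList k.toList h.toList v0.toList hk0 hv0 (by simpa using this)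
    exact ⟨String.toList_inj.mp this.1, String.toList_inj.mp this.2⟩
  · rintro ⟨rfl, rfl⟩
    apply String.toList_inj.mp
    rw [String.toList_append, String.toList_append, hsplit]
    have hcol : (":" : String).toList = [':'] := rfl
    rw [hcol]
    simp

-- the filtered, enumerated table of matching entries
def pvE (d : PySem.Dict String String) : List (Int × (String × List String)) :=
  (PySem.List.enumerate pvTbl).filter (fun q => pvMatch d q.2.1)

theorem pvMem_hits_iff (tags : List (String × String)) (hnd : (tags.map Prod.fst).Nodup)
    (h : Int × List String) :
    h ∈ pvHitsI pvIndex tags ↔ ∃ q ∈ pvE (PySem.Dict.mk tags), h = (q.1, q.2.2) := by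
  have hkeys : (PySem.Dict.mk tags).keys.Nodup := by
    simpa [PySem.Dict.keys] using hnd
  constructor
  · intro hmem
    obtain ⟨p, hp, hsome⟩ := List.mem_filterMap.mp hmem
    by_cases hv : p.2 = ""
    · simp [hv] at hsome
    · simp only [hv, if_false] at hsome
      rw [pvIndex_eq] at hsome
      have hitem := (PySem.Dict.get?_eq_some_iff_mem_items pvIndex' _ _ pvIndex'_keys_nodup).mp hsome
      have hmm : (pvCand p.1 p.2, h) ∈ (PySem.List.enumerate pvTbl).map (fun q => (q.2.1, (q.1, q.2.2))) := hitem
      obtain ⟨q, hq, heq⟩ := List.mem_map.mp hmm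
      have hq2 : q.2 ∈ pvTbl := by
        have := List.mem_map_of_mem (f := fun x => x.2) hq
        rwa [PySem.List.map_snd_enumerate] at this
      obtain ⟨hs, hkv, hk0c, hv0c⟩ := pvTbl_key_fact q.2 hq2
      have hk0 : ':' ∉ (pvK q.2.1).toList := by simpa using hk0c
      have hv0 : ':' ∉ (pvV q.2.1).toList := by simpa using hv0c
      have hcand : pvCand p.1 p.2 = q.2.1 := (congrArg Prod.fst heq).symm
      have hh : h = (q.1, q.2.2) := (congrArg Prod.snd heq).symm
      unfold pvCand at hcand
      have hkh := (pvCand_eq_iff p.1 _ q.2.1 (pvK q.2.1) (pvV q.2.1) hkv hk0 hv0).mp hcand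
      refine ⟨q, ?_, hh⟩
      unfold pvE
      rw [List.mem_filter]
      refine ⟨hq, ?_⟩
      unfold pvMatch
      rw [hs]
      have hget : (PySem.Dict.mk tags).get? p.1 = some p.2 :=
        PySem.Dict.get?_of_mem_items _ (by simpa using hp) hkeys
      rw [hkh.1] at hget
      show (match (PySem.Dict.mk tags).get? (pvK q.2.1) with
            | none => false
            | some t => if t = "" then false
                else decide (PySem.List.pyGetD ((PySem.Str.split? t ";").getD []) 0 "" = pvV q.2.1)) = true
      rw [hget]
      simp [hv, hkh.2]
  · rintro ⟨q, hq, rfl⟩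
    unfold pvE at hq
    rw [List.mem_filter] at hq
    obtain ⟨hq, hm⟩ := hq
    have hq2 : q.2 ∈ pvTbl := by
      have := List.mem_map_of_mem (f := fun x => x.2) hq
      rwa [PySem.List.map_snd_enumerate] at this
    obtain ⟨hs, hkv, hk0c, hv0c⟩ := pvTbl_key_fact q.2 hq2
    have hk0 : ':' ∉ (pvK q.2.1).toList := by simpa using hk0c
    have hv0 : ':' ∉ (pvV q.2.1).toList := by simpa using hv0c
    unfold pvMatch at hm
    rw [hs] at hm
    have hm' : (match (PySem.Dict.mk tags).get? (pvK q.2.1) with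
            | none => false
            | some t => if t = "" then false
                else decide (PySem.List.pyGetD ((PySem.Str.split? t ";").getD []) 0 "" = pvV q.2.1)) = true := hm
    rcases hg : (PySem.Dict.mk tags).get? (pvK q.2.1) with _ | t <;> rw [hg] at hm'
    · simp at hm'
    · by_cases ht : t = ""
      · simp [ht] at hm'
      · simp only [ht, if_false, decide_eq_true_eq] at hm'
        have hp : (pvK q.2.1, t) ∈ tags := by
          simpa using PySem.Dict.mem_items_of_get?_eq_some _ hg
        apply List.mem_filterMap.mpr
        refine ⟨(pvK q.2.1, t), hp, ?_⟩
        simp only [ht, if_false]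
        have hcand : pvCand (pvK q.2.1) t = q.2.1 := by
          unfold pvCand
          rw [hm']
          exact (pvCand_eq_iff (pvK q.2.1) (pvV q.2.1) q.2.1 (pvK q.2.1) (pvV q.2.1) hkv hk0 hv0).mpr ⟨rfl, rfl⟩
        rw [hcand, pvIndex_eq]
        apply (PySem.Dict.get?_eq_some_iff_mem_items pvIndex' _ _ pvIndex'_keys_nodup).mpr
        show _ ∈ (PySem.List.enumerate pvTbl).map (fun q => (q.2.1, (q.1, q.2.2)))
        exact List.mem_map.mpr ⟨q, hq, rfl⟩

theorem pvE_pairwise (d : PySem.Dict String String) :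
    (pvE d).Pairwise (fun a b => a.1 < b.1) := by
  apply List.Pairwise.filter
  have h1 : (List.map (fun x => x.1) (PySem.List.enumerate pvTbl)).Pairwise (· < ·) := by
    rw [PySem.List.map_fst_enumerate]
    exact PySem.List.pairwise_lt_pyRange_one _ _
  exact (List.pairwise_map).mp h1

theorem pvMain (tags : List (String × String)) (hnd : (tags.map Prod.fst).Nodup) :
    determine_icon tags = determine_icon_alt tags := by
  unfold determine_icon determine_icon_alt
  rw [pvALoop_eq_filter, pvBLoop_eq_foldl]
  have hfe : pvTbl.filter (fun e => pvMatch (PySem.Dict.mk tags) e.1)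
      = (pvE (PySem.Dict.mk tags)).map (fun q => q.2) := by
    unfold pvE
    conv_lhs => rw [← PySem.List.map_snd_enumerate pvTbl 0]
    rw [List.filter_map]
    rfl
  rw [hfe]
  rcases hE : pvE (PySem.Dict.mk tags) with _ | ⟨p, E'⟩
  · have hhits : pvHitsI pvIndex tags = [] := by
      apply List.eq_nil_iff_forall_not_mem.mpr
      intro h hmem
      obtain ⟨q, hq, _⟩ := (pvMem_hits_iff tags hnd h).mp hmem
      rw [hE] at hq
      simp at hq
    rw [hhits]
    rfl
  · have hpmem : (p.1, p.2.2) ∈ pvHitsI pvIndex tags :=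
      (pvMem_hits_iff tags hnd _).mpr ⟨p, by rw [hE]; exact List.mem_cons_self .., rfl⟩
    rcases hhits : pvHitsI pvIndex tags with _ | ⟨h0, hrest⟩
    · rw [hhits] at hpmem; simp at hpmem
    · rw [hhits] at hpmem
      have hfold : List.foldl pvStep none (h0 :: hrest) = List.foldl pvStep (some h0) hrest := rfl
      obtain ⟨m, hm, hmem, hle0, hmin⟩ := pvFoldl_min hrest h0
      rw [hfold, hm]
      have hmmem : m ∈ pvHitsI pvIndex tags := by
        rw [hhits]
        rcases hmem with rfl | hmem
        · exact List.mem_cons_self ..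
        · exact List.mem_cons_of_mem _ hmem
      have hminall : ∀ x ∈ h0 :: hrest, m.1 ≤ x.1 := by
        intro x hx
        rcases List.mem_cons.mp hx with rfl | hx
        · exact hle0
        · exact hmin x hx
      have hmle : m.1 ≤ p.1 := hminall (p.1, p.2.2) hpmem
      obtain ⟨q, hq, rfl⟩ := (pvMem_hits_iff tags hnd m).mp hmmem
      rw [hE] at hq
      have hpw := pvE_pairwise (PySem.Dict.mk tags)
      rw [hE, List.pairwise_cons] at hpw
      rcases List.mem_cons.mp hq with rfl | hq
      · simp
      · exact absurd (hpw.1 q hq) (by simpa using hmle)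

-- ===== VERDICT (by name: the statement is the Claim_ definition above) =====
theorem determine_icon_spec : Claim_equal_determine_icon := by
  intro tags _ hpre
  unfold Spec_determine_icon
  exact pvMain tags hpre
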